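-- pv_equiv track=rewrite | github.com/n0s0r0g/perfect_OSM | common/routines.py | composite_value
-- ===== SOURCE A (Python) =====
-- def composite_value(value):
--     if ';' in value:
--         items = []
--         first = True
--         for tmp in value.split(';'):
--             if not first and tmp.startswith(' '):
--                 tmp = tmp[1:]
--             items.append(tmp)
--             first = False
--     else:
--         items = [value]
--     return items
-- ===== SOURCE B (Python) =====
-- def composite_value(value):
--     if ';' in value:
--         # removing exactly one space right after each ';' equals stripping one
--         # leading space from each non-first split element
--         return value.replace('; ', ';').split(';')
--     else:
--         return [value]
-- ===== Notes on version B (the rewrite author's own statement) =====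
-- stated objective: simpler
-- what changed: Replaces the split-then-loop (stripping one leading space per non-first item with a first-flag accumulator) by a normalize-then-split pass: replace('; ', ';') removes exactly one space after each delimiter, then a plain split(';').
import Mathlib
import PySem

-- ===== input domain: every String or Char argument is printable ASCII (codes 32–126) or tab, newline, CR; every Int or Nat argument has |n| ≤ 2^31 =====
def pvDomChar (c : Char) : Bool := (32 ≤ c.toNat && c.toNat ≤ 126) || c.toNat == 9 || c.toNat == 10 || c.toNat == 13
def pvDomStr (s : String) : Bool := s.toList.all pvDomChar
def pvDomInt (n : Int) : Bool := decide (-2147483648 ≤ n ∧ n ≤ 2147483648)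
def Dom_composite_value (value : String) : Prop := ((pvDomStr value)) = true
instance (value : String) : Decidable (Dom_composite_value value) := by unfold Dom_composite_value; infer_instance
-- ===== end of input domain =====

-- B replaces A's split-then-loop (first-flag, strip one leading space per non-first piece)
-- by normalize-then-split: replace('; ', ';') then split(';'); same return value.

-- ===== PORT A =====
-- A's loop body: one iteration of the for-loop (state = (items, first))
def pvStepA (st : List String × Bool) (tmp : String) : List String × Bool :=
  let tmp' := if !st.2 && PySem.Str.startswith tmp " "
              then PySem.Str.slice tmp (some 1) none else tmp
  (st.1 ++ [tmp'], false)

-- literal port of A: split on ';', loop with a `first` flag stripping tmp[1:] when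
-- a non-first piece startswith ' ', appending to `items`.
def composite_value (value : String) : List String :=
  if PySem.Str.isIn ";" value then
    let parts := List.map String.ofList (PySem.Chars.splitOn value.toList ";".toList)
    let r := parts.foldl pvStepA ([], true)
    r.1
  else [value]

-- ===== PORT B =====
-- literal port of B: value.replace('; ', ';').split(';') under the same guard.
def composite_value_alt (value : String) : List String :=
  if PySem.Str.isIn ";" value then
    List.map String.ofList (PySem.Chars.splitOn (PySem.Str.replace value "; " ";").toList ";".toList)
  else [value]

-- ===== PRECONDITION & SPEC =====
def Spec_composite_value (value : String) (out : List String) : Prop := out = composite_value_alt value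
instance (value : String) (out : List String) : Decidable (Spec_composite_value value out) := by unfold Spec_composite_value; infer_instance

-- ===== CLAIM (what is proved, stated in full; the proofs are below) =====
def Claim_equal_composite_value : Prop := ∀ (value : String), Dom_composite_value value → Spec_composite_value value (composite_value value)

-- ===== LEMMAS AND PROOFS =====

-- simple recursive split on ';' returning (first piece, remaining pieces)
def pvSplit1 : List Char → List Char × List (List Char)
  | [] => ([], [])
  | c :: r => if c = ';' then ([], (pvSplit1 r).1 :: (pvSplit1 r).2)
              else (c :: (pvSplit1 r).1, (pvSplit1 r).2)

-- simple recursive replace of "; " by ";"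
def pvRep : List Char → List Char
  | [] => []
  | [c] => [c]
  | c :: d :: t => if c = ';' ∧ d = ' ' then ';' :: pvRep t else c :: pvRep (d :: t)

-- strip one leading space
def pvStrip1 : List Char → List Char
  | [] => []
  | c :: t => if c = ' ' then t else c :: t

theorem pvSplitOn_go_spec (fuel : Nat) : ∀ (l cur : List Char) (accs : List (List Char)),
    l.length ≤ fuel →
    PySem.Chars.splitOn.go [';'] fuel l cur accs =
      accs.reverse ++ ((cur.reverse ++ (pvSplit1 l).1) :: (pvSplit1 l).2) := by
  induction fuel with
  | zero =>
    intro l cur accs h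
    have : l = [] := List.eq_nil_of_length_eq_zero (Nat.le_zero.mp h)
    subst this
    simp [PySem.Chars.splitOn.go, pvSplit1]
  | succ n ih =>
    intro l cur accs h
    match l with
    | [] => simp [PySem.Chars.splitOn.go, pvSplit1]
    | c :: rest =>
      by_cases hc : c = ';'
      · subst hc
        rw [PySem.Chars.splitOn.go]
        have hp : [';'].isPrefixOf (';' :: rest) = true := by simp [List.isPrefixOf]
        rw [if_pos hp]
        simp only [List.length_cons, Nat.add_le_add_iff_right] at h
        simp only [List.length_cons, List.drop_succ_cons, List.length_nil, List.drop_zero]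
        rw [ih rest [] (cur.reverse :: accs) h]
        simp [pvSplit1]
      · rw [PySem.Chars.splitOn.go]
        have hp : [';'].isPrefixOf (c :: rest) = false := by
          simp [List.isPrefixOf]
          exact fun h => hc h.symm
        rw [hp]
        simp only [Bool.false_eq_true, if_false]
        rw [ih rest (c :: cur) accs (by simpa using Nat.le_of_succ_le_succ h)]
        simp [pvSplit1, hc]

theorem pvSplitOn_spec (l : List Char) :
    PySem.Chars.splitOn l [';'] = (pvSplit1 l).1 :: (pvSplit1 l).2 := by
  rw [PySem.Chars.splitOn]
  rw [pvSplitOn_go_spec (l.length + 1) l [] [] (by omega)]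
  simp

theorem pvReplace_go_spec (fuel : Nat) : ∀ (l acc : List Char),
    l.length ≤ fuel →
    PySem.Chars.replace.go [';', ' '] [';'] fuel l acc = acc.reverse ++ pvRep l := by
  induction fuel with
  | zero =>
    intro l acc h
    have : l = [] := List.eq_nil_of_length_eq_zero (Nat.le_zero.mp h)
    subst this
    simp [PySem.Chars.replace.go, pvRep]
  | succ n ih =>
    intro l acc h
    match l with
    | [] => simp [PySem.Chars.replace.go, pvRep]
    | c :: rest =>
      rw [PySem.Chars.replace.go]
      match rest with
      | [] =>
        have hp : [';', ' '].isPrefixOf [c] = false := by simp [List.isPrefixOf]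
        rw [hp]
        simp only [Bool.false_eq_true, if_false]
        rw [ih [] (c :: acc) (by simp)]
        simp [pvRep]
      | d :: t =>
        by_cases hcd : c = ';' ∧ d = ' '
        · obtain ⟨h1, h2⟩ := hcd
          subst h1; subst h2
          have hp : [';', ' '].isPrefixOf (';' :: ' ' :: t) = true := by
            simp [List.isPrefixOf]
          rw [if_pos hp]
          have ht : t.length ≤ n := by simp at h; omega
          simp only [List.length_cons, List.drop_succ_cons, List.length_nil, List.drop_zero]
          rw [ih t ([';'].reverse ++ acc) ht]
          simp [pvRep]
        · have hp : [';', ' '].isPrefixOf (c :: d :: t) = false := by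
            simp [List.isPrefixOf]
            intro h1 h2; exact hcd ⟨h1.symm, h2.symm⟩
          rw [hp]
          simp only [Bool.false_eq_true, if_false]
          rw [ih (d :: t) (c :: acc) (by simp at h ⊢; omega)]
          simp [pvRep, hcd]

theorem pvReplace_spec (l : List Char) :
    PySem.Chars.replace l [';', ' '] [';'] = pvRep l := by
  rw [PySem.Chars.replace]
  simp only [List.isEmpty, Bool.false_eq_true, if_false]
  exact pvReplace_go_spec l.length l [] (le_refl _)

-- the crux: replacing "; " by ";" commutes with splitting, as stripping one
-- leading space from each non-first piece
theorem pvMain (l : List Char) :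
    pvSplit1 (pvRep l) = ((pvSplit1 l).1, (pvSplit1 l).2.map pvStrip1) := by
  induction l using pvRep.induct with
  | case1 => simp [pvRep, pvSplit1]
  | case2 c =>
    by_cases hc : c = ';' <;> simp [pvRep, pvSplit1, hc, pvStrip1]
  | case3 c d t hcd ih =>
    obtain ⟨h1, h2⟩ := hcd; subst h1; subst h2
    simp [pvRep, pvSplit1, ih, pvStrip1]
  | case4 c d t hcd ih =>
    rw [pvRep, if_neg hcd]
    by_cases hc : c = ';'
    · subst hc
      have hd : d ≠ ' ' := fun h => hcd ⟨rfl, h⟩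
      have hhead : pvStrip1 (pvSplit1 (d :: t)).1 = (pvSplit1 (d :: t)).1 := by
        by_cases hd2 : d = ';'
        · simp [pvSplit1, hd2, pvStrip1]
        · simp [pvSplit1, hd2, pvStrip1, hd]
      simp [pvSplit1, ih]
      simp [pvSplit1] at hhead
      exact hhead.symm
    · simp [pvSplit1, hc, ih]

-- A's per-element fix equals pvStrip1 through String.ofList
theorem pvStripStr (p : List Char) :
    (if PySem.Str.startswith (String.ofList p) " "
     then PySem.Str.slice (String.ofList p) (some 1) none else String.ofList p)
      = String.ofList (pvStrip1 p) := by
  by_cases h : PySem.Str.startswith (String.ofList p) " "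
  · rw [if_pos h]
    have hp : (' ' :: p.tail) = p := by
      have := h
      simp [PySem.Str.startswith, PySem.Chars.startswith] at this
      obtain ⟨u, hu⟩ := this
      simp at hu
      rw [← hu]
      simp
    have : (PySem.Str.slice (String.ofList p) (some 1) none).toList = p.tail := by
      simp [PySem.Str.toList_slice, PySem.List.slice_from_one]
    apply String.toList_inj.mp ?_
    rw [this]
    rw [← hp]
    simp [pvStrip1]
  · rw [if_neg h]
    congr 1
    match p with
    | [] => simp [pvStrip1]
    | c :: t =>
      have : ¬ c = ' ' := by
        intro hc; subst hc
        exact h (by simp [PySem.Str.startswith, PySem.Chars.startswith, List.isPrefixOf])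
      simp [pvStrip1, this]

-- A's fold once the `first` flag is false
theorem pvFold_false (xs : List String) (acc : List String) :
    xs.foldl pvStepA (acc, false)
      = (acc ++ xs.map (fun tmp => if PySem.Str.startswith tmp " "
                    then PySem.Str.slice tmp (some 1) none else tmp), false) := by
  induction xs generalizing acc with
  | nil => simp
  | cons x xs ih =>
    rw [List.foldl_cons,
        show pvStepA (acc, false) x
          = (acc ++ [if PySem.Str.startswith x " "
                     then PySem.Str.slice x (some 1) none else x], false) by
          simp [pvStepA],
        ih]
    simp

theorem composite_value_ok (value : String) :
    composite_value value = composite_value_alt value := by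
  unfold composite_value composite_value_alt
  by_cases hin : PySem.Str.isIn ";" value
  · rw [if_pos hin, if_pos hin]
    have hsep : (";" : String).toList = [';'] := by decide
    have hrep : (PySem.Str.replace value "; " ";").toList
        = pvRep value.toList := by
      rw [PySem.Str.toList_replace]
      have h1 : ("; " : String).toList = [';', ' '] := by decide
      rw [h1, hsep]
      exact pvReplace_spec value.toList
    rw [hsep, hrep, pvSplitOn_spec, pvSplitOn_spec, pvMain]
    simp only [List.map_cons]
    rw [List.foldl_cons,
        show pvStepA ([], true) (String.ofList (pvSplit1 value.toList).1)
          = ([String.ofList (pvSplit1 value.toList).1], false) by simp [pvStepA],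
        pvFold_false]
    simp only [List.singleton_append, List.map_map]
    congr 1
    apply List.map_congr_left
    intro p _
    exact pvStripStr p
  · rw [if_neg hin, if_neg hin]

-- ===== VERDICT (by name: the statement is the Claim_ definition above) =====
theorem composite_value_spec : Claim_equal_composite_value := by
  intro value _
  unfold Spec_composite_value
  exact composite_value_ok value
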